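-- pv_equiv track=rewrite | github.com/ChenXiDiong/MonashProjects | FIT3155 - Advanced Algorithms and Data Structures/Assignment1/q2/q2.py | matched_prefix
-- ===== SOURCE A (Python) =====
-- def matched_prefix(rev_z_array):
--     """
--     A version of matched prefix that makes use of the z-suffix array instead of the z-prefix array.
--     Matched_prefix is finding the match of a prefix with the longest proper suffix, so in reverse we are matching the known suffix with a prefix.
--
--     :Input:
--         rev_z_arry: The z-values of a z-suffix array.
--
--     :Return: The length array containing all the matchedprefix values.
--
--     :Time Complexity: O(N) where N is the length of the pattern. We only iterate through the pattern once and perform constant time operations.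
--
--     :Space Complexity: O(N) where N is the length of the pattern. We only allocate space for N matched prefix values.
--     """
--     M = len(rev_z_array)
--     #Init of length array
--     len_arr = [0]*(M+1)
--
--     for i in range(M):
--         j = M-1 - i
--         z_value = rev_z_array[i]
--
--         if i - z_value == -1  and rev_z_array[i] > len_arr[j+1]:
--             len_arr[j] = z_value
--         else:
--             len_arr[j] = len_arr[j+1]
--
--     return len_arr
-- ===== SOURCE B (Python) =====
-- def matched_prefix(rev_z_array):
--     """Segment-fill re-implementation.
--
--     A qualifying position i (rev_z_array[i] == i+1) contributes the value i+1,
--     which is strictly larger than any earlier qualifying value, so the running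
--     maximum at any point is simply (largest qualifying index so far) + 1.
--     Hence the output is piecewise constant: collect the qualifying indices,
--     then fill the output in constant blocks from largest index down, padding
--     the tail with zeros.  No running maximum is computed at all.
--     """
--     M = len(rev_z_array)
--     hits = [i for i, z in enumerate(rev_z_array) if z == i + 1]
--     out = []
--     top = M - 1
--     for h in reversed(hits):
--         out.extend([h + 1] * (top - h + 1))
--         top = h - 1
--     out.extend([0] * (top + 2))
--     return out
-- ===== Notes on version B (the rewrite author's own statement) =====
-- stated objective: alternative
-- what changed: Replaces A's backward running-maximum fill with a segment-fill algorithm: it collects the qualifying indices (z==i+1), observes that qualifying values i+1 are strictly increasing so the running max equals (last qualifying index)+1, and writes the output as constant blocks between consecutive qualifying indices, with no maximum computed at all.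
import Mathlib
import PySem

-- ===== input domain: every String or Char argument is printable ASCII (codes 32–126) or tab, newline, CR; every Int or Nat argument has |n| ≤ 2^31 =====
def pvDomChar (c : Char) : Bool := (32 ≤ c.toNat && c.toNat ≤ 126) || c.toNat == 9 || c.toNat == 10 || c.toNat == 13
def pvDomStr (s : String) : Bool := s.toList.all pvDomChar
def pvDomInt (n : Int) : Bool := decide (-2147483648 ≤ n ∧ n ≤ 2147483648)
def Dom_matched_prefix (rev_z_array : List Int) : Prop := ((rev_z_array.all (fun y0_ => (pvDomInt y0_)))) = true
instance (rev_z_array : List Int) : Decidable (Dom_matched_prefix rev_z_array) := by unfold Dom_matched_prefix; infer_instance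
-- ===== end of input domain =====

-- B replaces A's backward running-maximum fill by a segment-fill over the qualifying indices (objective: alternative); equivalence proved on all of Dom.


-- ===== PORT A =====
-- Literal port of A: len_arr = [0]*(M+1); for i in range(M): j = M-1-i; conditional write at j.
-- rev_z_array[i] and len_arr[j+1] are always in range (i < M, j+1 ≤ M), so getD is exact here.
def matched_prefix (rev_z_array : List Int) : List Int :=
  let M := rev_z_array.length
  (List.range M).foldl
    (fun len_arr i =>
      let j := M - 1 - i
      let z_value := rev_z_array.getD i 0
      if (i : Int) - z_value = -1 ∧ z_value > len_arr.getD (j + 1) 0 then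
        len_arr.set j z_value
      else
        len_arr.set j (len_arr.getD (j + 1) 0))
    (List.replicate (M + 1) 0)

-- ===== PORT B =====
-- Literal port of Source B: hits = qualifying indices; segment fill from largest hit down, zeros tail.
-- Python's [x]*k yields [] for negative k, matching Int.toNat's clamp, so the port is exact.
def matched_prefix_alt (rev_z_array : List Int) : List Int :=
  let M : Int := rev_z_array.length
  let hits := ((PySem.List.enumerate rev_z_array).filter (fun p => p.2 == p.1 + 1)).map (fun p => p.1)
  let res := hits.reverse.foldl
    (fun (st : List Int × Int) h => (st.1 ++ List.replicate (st.2 - h + 1).toNat (h + 1), h - 1))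
    (([] : List Int), M - 1)
  res.1 ++ List.replicate (res.2 + 2).toNat 0

-- ===== PRECONDITION & SPEC =====
def Spec_matched_prefix (rev_z_array : List Int) (out : List Int) : Prop := out = matched_prefix_alt rev_z_array
instance (rev_z_array : List Int) (out : List Int) : Decidable (Spec_matched_prefix rev_z_array out) := by unfold Spec_matched_prefix; infer_instance

-- ===== CLAIM (what is proved, stated in full; the proofs are below) =====
def Claim_equal_matched_prefix : Prop := ∀ (rev_z_array : List Int), Dom_matched_prefix rev_z_array → Spec_matched_prefix rev_z_array (matched_prefix rev_z_array)

-- ===== LEMMAS AND PROOFS =====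

-- A's loop body as a step function on the fold value, with the enumerated index as an Int.
def pvStepA (a : Int) (p : Int × Int) : Int := if p.1 - p.2 = -1 ∧ p.2 > a then p.2 else a

theorem pvScanl_concat {α β : Type} (f : β → α → β) (l : List α) (b : β) (x : α) :
    List.scanl f b (l ++ [x]) = List.scanl f b l ++ [f (List.foldl f b l) x] := by
  induction l generalizing b with
  | nil => rfl
  | cons y l ih => simp [List.scanl_cons, ih]

theorem pvScanl_reverse_head {α β : Type} (f : β → α → β) (l : List α) (b d : β) :
    (List.scanl f b l).reverse.getD 0 d = List.foldl f b l := by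
  induction l generalizing b with
  | nil => rfl
  | cons x l ih =>
    simp only [List.scanl_cons, List.reverse_cons, List.foldl_cons]
    rw [List.getD, List.getElem?_append_left (by simp [List.length_scanl])]
    rw [← List.getD, ih]

-- A's loop invariant: after k iterations, len_arr = zeros ++ reversed scanl over the first k enumerated pairs.
theorem pvA_invariant (l : List Int) (k : Nat) (hk : k ≤ l.length) :
    (List.range k).foldl
      (fun len_arr i =>
        let j := l.length - 1 - i
        let z_value := l.getD i 0
        if (i : Int) - z_value = -1 ∧ z_value > len_arr.getD (j + 1) 0 then
          len_arr.set j z_value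
        else
          len_arr.set j (len_arr.getD (j + 1) 0))
      (List.replicate (l.length + 1) 0)
    = List.replicate (l.length - k) 0
        ++ (List.scanl pvStepA 0 (PySem.List.enumerate (l.take k))).reverse := by
  induction k with
  | zero =>
    simp [List.replicate_succ']
  | succ k ih =>
    have hk' : k ≤ l.length := Nat.le_of_succ_le hk
    have hklt : k < l.length := hk
    rw [List.range_succ, List.foldl_append, ih hk', List.foldl_cons, List.foldl_nil]
    set R := (List.scanl pvStepA 0 (PySem.List.enumerate (l.take k))).reverse with hR
    have hRlen : R.length = k + 1 := by
      simp [hR, List.length_scanl, List.length_take, Nat.min_eq_left hk']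
    have hrep : l.length - k = (l.length - k - 1) + 1 := by omega
    have hget : (List.replicate (l.length - k) 0 ++ R).getD (l.length - 1 - k + 1) 0
        = List.foldl pvStepA 0 (PySem.List.enumerate (l.take k)) := by
      have h1 : l.length - 1 - k + 1 = l.length - k := by omega
      rw [h1, List.getD, List.getElem?_append_right (by simp)]
      simp only [List.length_replicate, Nat.sub_self]
      rw [← List.getD, hR, pvScanl_reverse_head]
    have hz : l.getD k 0 = l[k] := by
      simp [List.getD, List.getElem?_eq_getElem hklt]
    have htake : l.take (k+1) = l.take k ++ [l[k]] := by
      rw [List.take_add_one, List.getElem?_eq_getElem hklt]; rfl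
    have henum : PySem.List.enumerate (l.take (k+1))
        = PySem.List.enumerate (l.take k) ++ [((k : Int), l[k])] := by
      rw [htake, PySem.List.enumerate_append]
      simp [List.length_take, Nat.min_eq_left hk', PySem.List.enumerate]
    have hset : ∀ v : Int,
        (List.replicate (l.length - k) 0 ++ R).set (l.length - 1 - k) v
          = List.replicate (l.length - (k+1)) 0 ++ (v :: R) := by
      intro v
      rw [hrep, List.replicate_succ']
      rw [List.append_assoc, List.set_append_right _ _ (by simp; omega)]
      have : l.length - 1 - k - (List.replicate (l.length - k - 1) (0:Int)).length = 0 := by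
        simp; omega
      rw [this]
      simp only [List.singleton_append, List.set_cons_zero]
      have : l.length - (k + 1) = l.length - k - 1 := by omega
      rw [this]
    rw [henum, pvScanl_concat, List.reverse_append]
    simp only [List.reverse_singleton, List.singleton_append, ← hR]
    simp only [hget, hz]
    set a := List.foldl pvStepA 0 (PySem.List.enumerate (l.take k)) with ha
    by_cases hc : (k : Int) - l[k] = -1 ∧ l[k] > a
    · rw [if_pos hc, hset]
      have : pvStepA a ((k : Int), l[k]) = l[k] := by unfold pvStepA; simp [hc.1, hc.2]
      rw [this]
    · rw [if_neg hc, hset]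
      have : pvStepA a ((k : Int), l[k]) = a := by
        unfold pvStepA
        simp only []
        rw [if_neg hc]
      rw [this]

theorem pvA_char (l : List Int) :
    matched_prefix l = (List.scanl pvStepA 0 (PySem.List.enumerate l)).reverse := by
  unfold matched_prefix
  simp only []
  rw [pvA_invariant l l.length (le_refl _)]
  simp [List.take_length]

-- The qualifying indices, and B's segment builder in recursive form.
def pvHits (l : List Int) : List Int :=
  ((PySem.List.enumerate l).filter (fun p => p.2 == p.1 + 1)).map (fun p => p.1)

def pvBuild : List Int → Int → List Int
  | [], top => List.replicate (top + 2).toNat 0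
  | h :: t, top => List.replicate (top - h + 1).toNat (h + 1) ++ pvBuild t (h - 1)

theorem pvFoldB_eq_build (hs : List Int) (acc : List Int) (top : Int) :
    (hs.foldl
      (fun (st : List Int × Int) h => (st.1 ++ List.replicate (st.2 - h + 1).toNat (h + 1), h - 1))
      (acc, top)).1
    ++ List.replicate ((hs.foldl
      (fun (st : List Int × Int) h => (st.1 ++ List.replicate (st.2 - h + 1).toNat (h + 1), h - 1))
      (acc, top)).2 + 2).toNat 0
    = acc ++ pvBuild hs top := by
  induction hs generalizing acc top with
  | nil => simp [pvBuild]
  | cons h t ih =>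
    simp only [List.foldl_cons, pvBuild]
    rw [ih, List.append_assoc]

theorem pvB_char (l : List Int) :
    matched_prefix_alt l = pvBuild (pvHits l).reverse ((l.length : Int) - 1) := by
  unfold matched_prefix_alt pvHits
  simp only []
  rw [pvFoldB_eq_build]
  simp

-- The running value of A's loop.
def pvRun (l : List Int) : Int := List.foldl pvStepA 0 (PySem.List.enumerate l)

theorem pvRun_append (l : List Int) (x : Int) :
    pvRun (l ++ [x]) = pvStepA (pvRun l) (((l.length : Int)), x) := by
  unfold pvRun
  rw [PySem.List.enumerate_append, List.foldl_append]
  simp [PySem.List.enumerate]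

theorem pvA_append (l : List Int) (x : Int) :
    matched_prefix (l ++ [x]) = pvStepA (pvRun l) (((l.length : Int)), x) :: matched_prefix l := by
  rw [pvA_char, pvA_char, PySem.List.enumerate_append]
  have h1 : PySem.List.enumerate [x] (0 + (l.length : Int)) = [(((l.length : Int)), x)] := by
    simp [PySem.List.enumerate]
  rw [h1, pvScanl_concat, List.reverse_append]
  simp [pvRun]

theorem pvRun_head (l : List Int) : pvRun l = (matched_prefix l).getD 0 0 := by
  rw [pvA_char, pvScanl_reverse_head]; rfl

theorem pvHits_append (l : List Int) (x : Int) :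
    pvHits (l ++ [x])
      = pvHits l ++ (if x = (l.length : Int) + 1 then [((l.length : Int))] else []) := by
  unfold pvHits
  rw [PySem.List.enumerate_append, List.filter_append, List.map_append]
  simp [PySem.List.enumerate]
  split_ifs with h <;> simp [h]

theorem pvHits_lt (l : List Int) : ∀ h ∈ pvHits l, h < (l.length : Int) := by
  intro h hmem
  unfold pvHits at hmem
  obtain ⟨p, hp, rfl⟩ := List.mem_map.1 hmem
  have := List.mem_of_mem_filter hp
  obtain ⟨k, hk, rfl⟩ := (PySem.List.mem_enumerate_iff _ _ _).1 this
  simp only [Int.zero_add]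
  exact_mod_cast hk

-- Raising the top bound by one prepends the current head value.
theorem pvBuild_shift (hs : List Int) (top : Int)
    (hmem : ∀ h ∈ hs, h ≤ top) (htop : -1 ≤ top) :
    pvBuild hs (top + 1) = (pvBuild hs top).getD 0 0 :: pvBuild hs top := by
  cases hs with
  | nil =>
    simp only [pvBuild]
    have h1 : (top + 1 + 2).toNat = (top + 1).toNat + 1 + 1 := by omega
    have h2 : (top + 2).toNat = (top + 1).toNat + 1 := by omega
    rw [h1, h2, List.replicate_succ, List.replicate_succ]
    simp [List.getD]
  | cons h t =>
    have hh : h ≤ top := hmem h (List.mem_cons_self ..)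
    simp only [pvBuild]
    have h1 : (top + 1 - h + 1).toNat = (top - h).toNat + 1 + 1 := by omega
    have h2 : (top - h + 1).toNat = (top - h).toNat + 1 := by omega
    rw [h1, h2, List.replicate_succ, List.replicate_succ]
    simp [List.getD]

theorem pvMain (l : List Int) :
    matched_prefix l = matched_prefix_alt l ∧ 0 ≤ pvRun l ∧ pvRun l ≤ (l.length : Int) := by
  induction l using List.reverseRecOn with
  | nil =>
    refine ⟨rfl, le_refl 0, le_refl 0⟩
  | append_singleton l x ih =>
    obtain ⟨heq, hrun0, hrun1⟩ := ih
    set n : Int := (l.length : Int) with hn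
    have hrunstep : pvRun (l ++ [x]) = pvStepA (pvRun l) (n, x) := pvRun_append l x
    have hB : matched_prefix_alt (l ++ [x])
        = pvBuild (pvHits (l ++ [x])).reverse (((l ++ [x]).length : Int) - 1) := pvB_char _
    have hlen : ((l ++ [x]).length : Int) - 1 = n := by simp [hn]
    by_cases hq : x = n + 1
    · -- qualifying position: both sides prepend n + 1
      have hstep : pvStepA (pvRun l) (n, x) = n + 1 := by
        unfold pvStepA; rw [if_pos ⟨by omega, by omega⟩]; omega
      have hhits : (pvHits (l ++ [x])).reverse = n :: (pvHits l).reverse := by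
        rw [pvHits_append, if_pos hq, List.reverse_append]; rfl
      refine ⟨?_, ?_, ?_⟩
      · rw [pvA_append, hstep, hB, hlen, hhits]
        simp only [pvBuild]
        have h1 : (n - n + 1).toNat = 1 := by omega
        rw [h1, heq, pvB_char]
        rfl
      · rw [hrunstep, hstep]; omega
      · rw [hrunstep, hstep]
        simp [hn]
    · -- non-qualifying: A keeps the running value, B widens its first segment by one
      have hstep : pvStepA (pvRun l) (n, x) = pvRun l := by
        unfold pvStepA
        rw [if_neg]
        rintro ⟨h1, _⟩
        exact hq (by omega)
      have hhits : pvHits (l ++ [x]) = pvHits l := by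
        rw [pvHits_append, if_neg hq]; simp
      have hshift : pvBuild (pvHits l).reverse ((n - 1) + 1)
          = (pvBuild (pvHits l).reverse (n - 1)).getD 0 0
            :: pvBuild (pvHits l).reverse (n - 1) := by
        apply pvBuild_shift
        · intro h hh
          have := pvHits_lt l h ((List.mem_reverse).1 hh)
          omega
        · omega
      have hBl : matched_prefix_alt l = pvBuild (pvHits l).reverse (n - 1) := by
        rw [pvB_char, hn]
      refine ⟨?_, ?_, ?_⟩
      · rw [pvA_append, hstep, hB, hlen, hhits]
        have h1 : n = (n - 1) + 1 := by omega
        rw [h1, hshift, ← hBl, ← heq, ← pvRun_head]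
      · rw [hrunstep, hstep]; exact hrun0
      · rw [hrunstep, hstep]
        simp [hn] at hrun1 ⊢
        omega

-- ===== VERDICT (by name: the statement is the Claim_ definition above) =====
theorem matched_prefix_spec : Claim_equal_matched_prefix := by
  intro l _
  unfold Spec_matched_prefix
  exact (pvMain l).1
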